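-- pv_equiv track=rewrite | github.com/geordw/braids-project | peyl/noncrossing.py | bkl_gen_to_artin_word
-- ===== SOURCE A (Python) =====
-- from typing import Iterable, TypeVar
--
-- def bkl_gen_to_artin_word(s: int, t: int) -> Iterable[tuple[int, int]]:
--     """
--     Return a sequence of (i, e) for e = ±1 such that a_{st} is the product of the σ(i)^e.
--
--     >>> bkl_gen_to_artin_word(3, 3)
--     []
--     >>> bkl_gen_to_artin_word(3, 4)
--     [(3, 1)]
--     >>> bkl_gen_to_artin_word(5, 2)
--     [(4, 1), (3, 1), (2, 1), (3, -1), (4, -1)]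
--     """
--     # For s < t we have a_{st} = σ(t-1) . σ(t-2) ... σ(s+1) . σ(s) . σ(s+1)^-1 ... σ(t-1)^-1
--     if s == t:
--         return []
--     if s > t:
--         s, t = t, s
--
--     return [
--         *[(i, 1) for i in range(t-1, s, -1)],
--         (s, 1),
--         *[(i, -1) for i in range(s+1, t)],
--     ]
-- ===== SOURCE B (Python) =====
-- def bkl_gen_to_artin_word(s: int, t: int):
--     """Emit the word by an explicit-stack traversal of the nested conjugation
--     structure: word(s,v) = sigma(v-1) . word(s,v-1) . sigma(v-1)^-1, core (s,1).
--     A stack frame is either an int v (expand word(s,v)) or a ready (i,-1) pair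
--     to emit."""
--     if s == t:
--         return []
--     if s > t:
--         s, t = t, s
--     out = []
--     stack = [t]
--     while stack:
--         fr = stack.pop()
--         if type(fr) is tuple:
--             out.append(fr)
--         elif fr == s + 1:
--             out.append((s, 1))
--         else:
--             out.append((fr - 1, 1))
--             stack.append((fr - 1, -1))
--             stack.append(fr - 1)
--     return out
-- ===== Notes on version B (the rewrite author's own statement) =====
-- stated objective: alternative
-- what changed: Replaced A's two flat range comprehensions around the central (s,1) by an explicit-stack traversal of the nested conjugation structure word(s,v) = sigma(v-1).word(s,v-1).sigma(v-1)^-1: the loop pops word/emit frames, emitting the opening generator and deferring the closing inverse on the stack.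
import Mathlib
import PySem

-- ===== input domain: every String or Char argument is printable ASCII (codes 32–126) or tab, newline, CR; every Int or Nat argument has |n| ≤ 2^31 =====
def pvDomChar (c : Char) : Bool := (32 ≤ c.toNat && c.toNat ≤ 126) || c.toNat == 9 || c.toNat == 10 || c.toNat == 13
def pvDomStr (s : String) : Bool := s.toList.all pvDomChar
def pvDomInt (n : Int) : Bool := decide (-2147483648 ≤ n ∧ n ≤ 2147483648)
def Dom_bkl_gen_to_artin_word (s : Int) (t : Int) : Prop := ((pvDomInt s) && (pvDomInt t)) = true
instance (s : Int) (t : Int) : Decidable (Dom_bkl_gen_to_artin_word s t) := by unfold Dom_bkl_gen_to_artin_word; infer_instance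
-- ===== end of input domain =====

-- B emits the word by an explicit-stack traversal of the nested conjugation
-- structure word(s,v) = σ(v-1)·word(s,v-1)·σ(v-1)⁻¹ instead of A's two flat
-- range comprehensions (objective: alternative, same cost).

-- ===== PORT A =====
-- literal port: swap so s < t, then [(i,1) for i in range(t-1, s, -1)] + [(s,1)] + [(i,-1) for i in range(s+1, t)]
def bkl_gen_to_artin_word (s : Int) (t : Int) : List (Int × Int) :=
  if s = t then []
  else
    let s' := if s > t then t else s
    let t' := if s > t then s else t
    ((PySem.List.pyRange (t' - 1) s' (-1)).map (fun i => (i, (1 : Int))))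
      ++ [(s', 1)]
      ++ ((PySem.List.pyRange (s' + 1) t' 1).map (fun i => (i, (-1 : Int))))

-- ===== PORT B =====
-- Source B's while loop over the explicit stack; an int frame v is Sum.inl v, a
-- ready pair frame is Sum.inr p.  Python's 'fr == s + 1' base test becomes the
-- negation of the dite guard 's + 1 < v' (equivalent on every reachable frame,
-- and the dite gives termination).
def bklLoop (s : Int) (stack : List (Sum Int (Int × Int))) (out : List (Int × Int)) : List (Int × Int) :=
  match stack with
  | [] => out
  | (Sum.inr p) :: st => bklLoop s st (out ++ [p])
  | (Sum.inl v) :: st =>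
      if h : s + 1 < v then
        bklLoop s (Sum.inl (v - 1) :: Sum.inr (v - 1, -1) :: st) (out ++ [(v - 1, 1)])
      else
        bklLoop s st (out ++ [(s, 1)])
termination_by (stack.map (fun fr => match fr with | Sum.inl v => 2 * (v - s).toNat + 1 | Sum.inr _ => 1)).sum
decreasing_by
  · simp only [List.map_cons, List.sum_cons]; omega
  · simp only [List.map_cons, List.sum_cons]; omega
  · simp only [List.map_cons, List.sum_cons]; omega

def bkl_gen_to_artin_word_alt (s : Int) (t : Int) : List (Int × Int) :=
  if s = t then []
  else
    let s' := if s > t then t else s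
    let t' := if s > t then s else t
    bklLoop s' [Sum.inl t'] []

-- ===== PRECONDITION & SPEC =====
def Spec_bkl_gen_to_artin_word (s : Int) (t : Int) (out : List (Int × Int)) : Prop := out = bkl_gen_to_artin_word_alt s t
instance (s : Int) (t : Int) (out : List (Int × Int)) : Decidable (Spec_bkl_gen_to_artin_word s t out) := by unfold Spec_bkl_gen_to_artin_word; infer_instance

-- ===== CLAIM (what is proved, stated in full; the proofs are below) =====
def Claim_equal_bkl_gen_to_artin_word : Prop := ∀ (s : Int) (t : Int), Dom_bkl_gen_to_artin_word s t → Spec_bkl_gen_to_artin_word s t (bkl_gen_to_artin_word s t)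

-- ===== LEMMAS AND PROOFS =====

-- A's flat word (after the swap), as proof-local shorthand
def pvFlat (s : Int) (t : Int) : List (Int × Int) :=
  ((PySem.List.pyRange (t - 1) s (-1)).map (fun i => (i, (1 : Int))))
    ++ [(s, 1)]
    ++ ((PySem.List.pyRange (s + 1) t 1).map (fun i => (i, (-1 : Int))))

theorem pvFlat_base (s : Int) : pvFlat s (s + 1) = [(s, 1)] := by
  unfold pvFlat
  rw [PySem.List.pyRange_neg_one_eq_nil (by omega), PySem.List.pyRange_one_eq_nil (by omega)]
  simp

-- peel one conjugation layer off A's flat word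
theorem pvFlat_step (s t : Int) (h : s + 1 < t) :
    pvFlat s t = (t - 1, 1) :: (pvFlat s (t - 1) ++ [(t - 1, -1)]) := by
  unfold pvFlat
  rw [PySem.List.pyRange_neg_one_cons (by omega : s < t - 1),
    show t = (t - 1) + 1 from by ring,
    PySem.List.pyRange_one_succ_right (by omega : s + 1 ≤ t - 1)]
  simp only [show t - 1 + 1 - 1 = t - 1 from by ring, List.map_cons, List.map_append,
    List.map_nil, List.cons_append, List.append_assoc]

-- processing a "word" frame appends exactly the flat word for (s,v)
theorem bklLoop_word (s : Int) (n : Nat) :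
    ∀ (v : Int) (st : List (Sum Int (Int × Int))) (out : List (Int × Int)),
      s < v → (v - s).toNat = n →
      bklLoop s (Sum.inl v :: st) out = bklLoop s st (out ++ pvFlat s v) := by
  induction n with
  | zero => intro v st out hlt hn; omega
  | succ n ih =>
    intro v st out hlt hn
    rw [bklLoop]
    by_cases h : s + 1 < v
    · rw [dif_pos h, ih (v - 1) _ _ (by omega) (by omega), bklLoop,
        pvFlat_step s v h]
      simp [List.append_assoc]
    · rw [dif_neg h]
      have hv : v = s + 1 := by omega
      rw [hv, pvFlat_base]

-- ===== VERDICT (by name: the statement is the Claim_ definition above) =====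
theorem bkl_gen_to_artin_word_spec : Claim_equal_bkl_gen_to_artin_word := by
  intro s t _
  unfold Spec_bkl_gen_to_artin_word bkl_gen_to_artin_word bkl_gen_to_artin_word_alt
  by_cases he : s = t
  · simp [he]
  · simp only [if_neg he]
    by_cases hgt : s > t
    · simp only [if_pos hgt]
      rw [bklLoop_word t (s - t).toNat s [] [] hgt rfl]
      simp [bklLoop, pvFlat]
    · simp only [if_neg hgt]
      rw [bklLoop_word s (t - s).toNat t [] [] (by omega) rfl]
      simp [bklLoop, pvFlat]
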